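-- pv_equiv track=rewrite | github.com/s3v3nsins/codingchallanges | lc4.py | down_rotate_row
-- ===== SOURCE A (Python) =====
-- def down_rotate_row(matrix, encrypted_character):
-- 	for index, row in enumerate(matrix):
-- 		if encrypted_character in row:
-- 			column = row.index(encrypted_character)
-- 			break
-- 	temp = [matrix[i][column] for i in range(len(matrix))]
-- 	for i in range(len(temp) - 1):
-- 		matrix[i + 1][column] = temp[i]
-- 	matrix[0][column] = temp[-1]
-- 	return matrix
-- ===== SOURCE B (Python) =====
-- # B: one pass with a carried scalar — flat enumerate search for the column, then a
-- # single top-to-bottom sweep swapping each row's column cell with the carry (seeded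
-- # with the last row's value); mutates the matrix in place like A.
-- def down_rotate_row(matrix, encrypted_character):
--     column = next(i for row in matrix
--                     for i, v in enumerate(row) if v == encrypted_character)
--     carry = matrix[-1][column]
--     for row in matrix:
--         row[column], carry = carry, row[column]
--     return matrix
-- ===== Notes on version B (the rewrite author's own statement) =====
-- stated objective: simpler
-- what changed: B drops A's full temp-column copy and its two staged index-driven write loops: it finds the column with one flat enumerate generator, then does a single top-to-bottom sweep over the rows swapping each row's column cell with one carried scalar seeded from the last row.
import Mathlib
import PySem

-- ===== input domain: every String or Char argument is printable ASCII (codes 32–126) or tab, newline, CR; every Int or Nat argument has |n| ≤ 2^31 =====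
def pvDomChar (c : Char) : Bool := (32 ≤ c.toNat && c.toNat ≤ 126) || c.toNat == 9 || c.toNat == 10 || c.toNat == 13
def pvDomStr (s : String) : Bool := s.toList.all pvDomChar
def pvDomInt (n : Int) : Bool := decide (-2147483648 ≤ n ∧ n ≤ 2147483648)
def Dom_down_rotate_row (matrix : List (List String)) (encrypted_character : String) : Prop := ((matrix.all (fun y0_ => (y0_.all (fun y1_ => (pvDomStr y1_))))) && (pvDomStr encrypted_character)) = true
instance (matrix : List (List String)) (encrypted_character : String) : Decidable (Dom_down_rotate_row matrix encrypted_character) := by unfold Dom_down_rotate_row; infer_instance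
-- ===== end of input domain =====

-- B replaces A's temp-column copy and two index-driven write loops with a flat-enumerate
-- column search plus a single top-to-bottom sweep carrying one scalar; both mutate the
-- argument in place, and the equivalence proved is about the RETURN value.  Objective: simpler.

-- ===== PORT A =====
-- 'for index, row in enumerate(matrix): if ch in row: column = row.index(ch); break';
-- none = Python's 'column' stays unbound (NameError later) — excluded by Pre_.
def pyFindCol : List (List String) → String → Option Nat
  | [], _ => none
  | row :: rest, ch =>
    if row.contains ch then PySem.List.index? row ch
    else pyFindCol rest ch

def down_rotate_row (matrix : List (List String)) (encrypted_character : String) : List (List String) :=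
  match pyFindCol matrix encrypted_character with
  | none => matrix   -- Python raises NameError here; outside Pre_
  | some column =>
    let temp := (PySem.List.pyRange 0 (matrix.length : Int) 1).map
        (fun i => PySem.List.pyGetD (PySem.List.pyGetD matrix i []) (column : Int) "")
    let m1 := (PySem.List.pyRange 0 ((temp.length : Int) - 1) 1).foldl
        (fun m i =>
          PySem.List.pySetD m (i + 1)
            (PySem.List.pySetD (PySem.List.pyGetD m (i + 1) []) (column : Int)
              (PySem.List.pyGetD temp i "")))
        matrix
    PySem.List.pySetD m1 0
      (PySem.List.pySetD (PySem.List.pyGetD m1 0 []) (column : Int)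
        (PySem.List.pyGetD temp (-1) ""))

-- ===== PORT B =====
-- 'next(i for row in matrix for i, v in enumerate(row) if v == ch)'
def rowFirstIdx (row : List String) (ch : String) : Option Int :=
  ((PySem.List.enumerate row 0).find? (fun p => p.2 == ch)).map (·.1)

def findColB : List (List String) → String → Option Int
  | [], _ => none
  | row :: rest, ch =>
    match rowFirstIdx row ch with
    | some i => some i
    | none => findColB rest ch

-- 'for row in matrix: row[column], carry = carry, row[column]'
def shiftRows : List (List String) → Int → String → List (List String)
  | [], _, _ => []
  | row :: rest, c, carry =>
    PySem.List.pySetD row c carry :: shiftRows rest c (PySem.List.pyGetD row c "")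

def down_rotate_row_alt (matrix : List (List String)) (encrypted_character : String) : List (List String) :=
  match findColB matrix encrypted_character with
  | none => matrix   -- Python B's 'next' raises StopIteration here; outside Pre_
  | some column =>
    let carry := PySem.List.pyGetD (PySem.List.pyGetD matrix (-1) []) column ""
    shiftRows matrix column carry

-- ===== PRECONDITION & SPEC =====
-- column index chosen by the function: the index of the character in the first row containing it
def colOf (matrix : List (List String)) (ch : String) : Option Nat :=
  (matrix.find? (fun row => row.contains ch)).bind (fun r => PySem.List.index? r ch)

-- Pre_ excludes exactly the inputs where Python A raises: no row contains the character
-- (NameError: 'column' unbound; also the empty matrix) or some row is too short for the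
-- chosen column (IndexError).
def Pre_down_rotate_row (matrix : List (List String)) (encrypted_character : String) : Prop :=
  ((colOf matrix encrypted_character).elim false
    (fun c => matrix.all (fun row => decide (c < row.length)))) = true
instance (matrix : List (List String)) (encrypted_character : String) : Decidable (Pre_down_rotate_row matrix encrypted_character) := by unfold Pre_down_rotate_row; infer_instance

def pvWitness_down_rotate_row : List (List String) × String := ([["a", "b"], ["c", "d"]], "c")

def Spec_down_rotate_row (matrix : List (List String)) (encrypted_character : String) (out : List (List String)) : Prop := out = down_rotate_row_alt matrix encrypted_character
instance (matrix : List (List String)) (encrypted_character : String) (out : List (List String)) : Decidable (Spec_down_rotate_row matrix encrypted_character out) := by unfold Spec_down_rotate_row; infer_instance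

-- ===== CLAIM (what is proved, stated in full; the proofs are below) =====
def Claim_equal_down_rotate_row : Prop := ∀ (matrix : List (List String)) (encrypted_character : String), Dom_down_rotate_row matrix encrypted_character → Pre_down_rotate_row matrix encrypted_character → Spec_down_rotate_row matrix encrypted_character (down_rotate_row matrix encrypted_character)

-- ===== LEMMAS AND PROOFS =====

theorem pyFindCol_eq_colOf (matrix : List (List String)) (ch : String) :
    pyFindCol matrix ch = colOf matrix ch := by
  induction matrix with
  | nil => rfl
  | cons row rest ih =>
    simp only [pyFindCol, colOf, List.find?]
    by_cases h : ch ∈ row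
    · simp [h]
    · simp [h, colOf] at ih ⊢
      exact ih

theorem find_enumerate_eq_index? (row : List String) (ch : String) (s : Int) :
    ((PySem.List.enumerate row s).find? (fun p => p.2 == ch)).map (·.1) =
    (PySem.List.index? row ch).map (fun n => s + (n : Int)) := by
  induction row generalizing s with
  | nil => simp [PySem.List.enumerate_nil, PySem.List.index?]
  | cons x xs ih =>
    rw [PySem.List.enumerate_cons, List.find?_cons]
    by_cases h : x = ch
    · subst h
      rw [PySem.List.index?_cons_self]
      simp
    · have hne : ((s, x).2 == ch) = false := by simp [h]
      rw [hne, PySem.List.index?_cons_of_ne _ h, ih]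
      cases PySem.List.index? xs ch with
      | none => simp
      | some n => simp; ring

theorem rowFirstIdx_eq (row : List String) (ch : String) :
    rowFirstIdx row ch = (PySem.List.index? row ch).map (fun n => (n : Int)) := by
  unfold rowFirstIdx
  rw [find_enumerate_eq_index? row ch 0]
  simp

theorem findColB_eq_colOf (matrix : List (List String)) (ch : String) :
    findColB matrix ch = (colOf matrix ch).map (fun n => (n : Int)) := by
  induction matrix with
  | nil => rfl
  | cons row rest ih =>
    simp only [findColB, rowFirstIdx_eq, colOf, List.find?]
    by_cases h : ch ∈ row
    · have hc : row.contains ch = true := by simpa using h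
      obtain ⟨k, hk⟩ := Option.isSome_iff_exists.mp
        ((PySem.List.index?_isSome_iff row ch).mpr h)
      have hk2 : List.idxOf? ch row = some k := by
        rw [← PySem.List.index?_eq_idxOf?]; exact hk
      simp [h, hk2]
    · have hc : row.contains ch = false := by simpa using h
      have hnone : PySem.List.index? row ch = none := (PySem.List.index?_eq_none_iff row ch).mpr h
      simp only [hc, hnone]
      simpa [colOf] using ih

theorem findColB_some (matrix : List (List String)) (ch : String) (c : Nat)
    (h : colOf matrix ch = some c) : findColB matrix ch = some (c : Int) := by
  rw [findColB_eq_colOf, h]; rfl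

theorem shiftRows_length (ms : List (List String)) (c : Int) (carry : String) :
    (shiftRows ms c carry).length = ms.length := by
  induction ms generalizing carry with
  | nil => rfl
  | cons row rest ih => simp [shiftRows, ih]

theorem shiftRows_getElem? (ms : List (List String)) (c : Int) (carry : String) :
    ∀ j : Nat, j < ms.length →
    (shiftRows ms c carry)[j]? =
      some (PySem.List.pySetD (ms.getD j [])  c
        (if j = 0 then carry else PySem.List.pyGetD (ms.getD (j - 1) []) c "")) := by
  induction ms generalizing carry with
  | nil => intro j h; simp at h
  | cons row rest ih =>
    intro j h
    cases j with
    | zero => simp [shiftRows]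
    | succ k =>
      have hk : k < rest.length := by simpa using h
      simp only [shiftRows, List.getElem?_cons_succ]
      rw [ih _ k hk]
      cases k with
      | zero => simp
      | succ m => simp

-- length of A's update loop is invariant
theorem foldA_length (l : List Int) (c : Nat) (temp : List String)
    (m : List (List String)) :
    (l.foldl (fun m i =>
      PySem.List.pySetD m (i + 1)
        (PySem.List.pySetD (PySem.List.pyGetD m (i + 1) []) (c : Int)
          (PySem.List.pyGetD temp i ""))) m).length = m.length := by
  induction l generalizing m with
  | nil => rfl
  | cons x xs ih => rw [List.foldl_cons, ih, PySem.List.length_pySetD]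

-- elementwise characterisation of A's update loop after k steps
theorem foldA_getElem? (matrix : List (List String)) (c : Nat) (temp : List String)
    (k : Nat) :
    k < matrix.length → ∀ j : Nat,
    ((PySem.List.pyRange 0 (k : Int) 1).foldl (fun m i =>
      PySem.List.pySetD m (i + 1)
        (PySem.List.pySetD (PySem.List.pyGetD m (i + 1) []) (c : Int)
          (PySem.List.pyGetD temp i ""))) matrix)[j]? =
    if 1 ≤ j ∧ j ≤ k then some ((matrix.getD j []).set c (temp.getD (j - 1) ""))
    else matrix[j]? := by
  induction k with
  | zero =>
    intro _ j
    simp [PySem.List.pyRange_one_eq_nil]; omega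
  | succ k ih =>
    intro hk j
    have hk' : k < matrix.length := by omega
    rw [show ((k + 1 : Nat) : Int) = (k : Int) + 1 by push_cast; ring,
      PySem.List.pyRange_one_succ_right (by positivity), List.foldl_append]
    set F := (PySem.List.pyRange 0 (k : Int) 1).foldl (fun m i =>
      PySem.List.pySetD m (i + 1)
        (PySem.List.pySetD (PySem.List.pyGetD m (i + 1) []) (c : Int)
          (PySem.List.pyGetD temp i ""))) matrix with hF
    have hFlen : F.length = matrix.length := foldA_length _ _ _ _
    have hFk1 : F[k + 1]? = matrix[k + 1]? := by
      rw [ih hk' (k + 1)]; simp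
    simp only [List.foldl_cons, List.foldl_nil]
    have hset : PySem.List.pySetD F ((k : Int) + 1)
        (PySem.List.pySetD (PySem.List.pyGetD F ((k : Int) + 1) []) (c : Int)
          (PySem.List.pyGetD temp (k : Int) "")) =
        F.set (k + 1) ((matrix.getD (k + 1) []).set c (temp.getD k "")) := by
      rw [show ((k : Int) + 1) = ((k + 1 : Nat) : Int) by push_cast; ring,
        PySem.List.pySetD_natCast, PySem.List.pyGetD_natCast, PySem.List.pyGetD_natCast,
        PySem.List.pySetD_natCast]
      simp [List.getD_eq_getElem?_getD, hFk1]
    rw [hset]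
    by_cases hj : j = k + 1
    · subst hj
      rw [List.getElem?_set_self (by rw [hFlen]; omega)]
      simp
    · rw [List.getElem?_set_ne (by omega), ih hk' j]
      have h2 : (1 ≤ j ∧ j ≤ k) ↔ (1 ≤ j ∧ j ≤ k + 1) := by omega
      simp [h2]

-- ===== VERDICT (by name: the statement is the Claim_ definition above) =====
theorem down_rotate_row_spec : Claim_equal_down_rotate_row := by
  intro matrix ch hdom hpre
  unfold Spec_down_rotate_row
  unfold Pre_down_rotate_row at hpre
  cases hcol : colOf matrix ch with
  | none => rw [hcol] at hpre; simp at hpre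
  | some c =>
    rw [hcol] at hpre
    simp only [Option.elim] at hpre
    have hall : ∀ row ∈ matrix, c < row.length := by
      intro row hr
      have := List.all_eq_true.mp hpre row hr
      simpa using this
    have hne : matrix ≠ [] := by
      intro h; subst h; simp [colOf] at hcol
    have hn : 0 < matrix.length := List.length_pos_iff.mpr hne
    simp only [down_rotate_row, down_rotate_row_alt, pyFindCol_eq_colOf, hcol,
      findColB_some matrix ch c hcol]
    have htemp : (PySem.List.pyRange 0 (matrix.length : Int) 1).map
        (fun i => PySem.List.pyGetD (PySem.List.pyGetD matrix i []) (c : Int) "") =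
        matrix.map (fun row => PySem.List.pyGetD row (c : Int) "") := by
      calc (PySem.List.pyRange 0 (matrix.length : Int) 1).map
            (fun i => PySem.List.pyGetD (PySem.List.pyGetD matrix i []) (c : Int) "")
          = ((PySem.List.pyRange 0 (matrix.length : Int) 1).map
              (fun i => PySem.List.pyGetD matrix i [])).map
              (fun row => PySem.List.pyGetD row (c : Int) "") := by
            simp [List.map_map, Function.comp]
        _ = matrix.map (fun row => PySem.List.pyGetD row (c : Int) "") := by
            rw [PySem.List.map_pyGetD_pyRange_zero']
    rw [htemp]
    set colV := matrix.map (fun row => PySem.List.pyGetD row (c : Int) "") with hcolV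
    have hlenc : colV.length = matrix.length := by simp [hcolV]
    have hcast : ((colV.length : Int) - 1) = ((matrix.length - 1 : Nat) : Int) := by
      rw [hlenc]; omega
    rw [hcast]
    set F := (PySem.List.pyRange 0 ((matrix.length - 1 : Nat) : Int) 1).foldl (fun m i =>
      PySem.List.pySetD m (i + 1)
        (PySem.List.pySetD (PySem.List.pyGetD m (i + 1) []) (c : Int)
          (PySem.List.pyGetD colV i ""))) matrix with hFdef
    have hFlen : F.length = matrix.length := foldA_length _ _ _ _
    have hchar := foldA_getElem? matrix c colV (matrix.length - 1) (by omega)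
    have h0 : PySem.List.pyGetD F 0 [] = matrix.getD 0 [] := by
      rw [PySem.List.pyGetD_zero, List.getD_eq_getElem?_getD, hchar 0,
        List.getD_eq_getElem?_getD]
      simp
    rw [h0, PySem.List.pySetD_natCast]
    rw [show (0 : Int) = ((0 : Nat) : Int) by norm_num, PySem.List.pySetD_natCast]
    -- carry = last row's column value = colV[-1]
    have hcarry : PySem.List.pyGetD (PySem.List.pyGetD matrix (-1) []) (c : Int) "" =
        PySem.List.pyGetD colV (-1) "" := by
      rw [show (-1 : Int) = -((1 : Nat) : Int) by norm_num,
        PySem.List.pyGetD_neg_natCast matrix 1 [] (by omega) (by omega),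
        PySem.List.pyGetD_neg_natCast colV 1 "" (by omega) (by omega)]
      simp [hcolV]
    rw [hcarry]
    -- both sides elementwise
    apply List.ext_getElem
    · simp [hFlen, shiftRows_length]
    · intro j h1 h2
      have hjn : j < matrix.length := by simpa [hFlen] using h1
      have hB := shiftRows_getElem? matrix (c : Int) (PySem.List.pyGetD colV (-1) "") j hjn
      have hBj : (shiftRows matrix (c : Int) (PySem.List.pyGetD colV (-1) ""))[j] =
          PySem.List.pySetD (matrix.getD j []) (c : Int)
            (if j = 0 then PySem.List.pyGetD colV (-1) ""
             else PySem.List.pyGetD (matrix.getD (j - 1) []) (c : Int) "") := by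
        have h := List.getElem?_eq_getElem h2
        rw [hB] at h
        exact (Option.some.inj h).symm
      rw [hBj, PySem.List.pySetD_natCast]
      rcases Nat.eq_zero_or_pos j with hj0 | hjpos
      · subst hj0
        rw [List.getElem_set_self (by omega)]
        simp
      · obtain ⟨m, rfl⟩ : ∃ m, j = m + 1 := ⟨j - 1, by omega⟩
        rw [List.getElem_set_ne (by omega)]
        have hmem : F[m + 1]? = some ((matrix.getD (m + 1) []).set c (colV.getD m "")) := by
          rw [hchar (m + 1)]
          simp only [show (1 ≤ m + 1 ∧ m + 1 ≤ matrix.length - 1) from ⟨by omega, by omega⟩,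
            and_self, if_pos]
          rfl
        have hm1F : m + 1 < F.length := by rw [hFlen]; omega
        have hFj : F[m + 1] = (matrix.getD (m + 1) []).set c (colV.getD m "") := by
          have h := List.getElem?_eq_getElem hm1F
          rw [hmem] at h
          exact (Option.some.inj h).symm
        rw [hFj]
        have hcv : colV.getD m "" =
            PySem.List.pyGetD (matrix.getD (m + 1 - 1) []) (c : Int) "" := by
          simp only [Nat.add_sub_cancel, hcolV]
          rw [List.getD_eq_getElem?_getD, List.getElem?_map,
            List.getElem?_eq_getElem (show m < matrix.length by omega),
            List.getD_eq_getElem?_getD,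
            List.getElem?_eq_getElem (show m < matrix.length by omega)]
          simp
        rw [hcv]
        simp
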